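-- pv_equiv track=rewrite | github.com/IndhuDebugsLife/OCR_MERGED_TABLE_PARSER | MergedTableParser.py | remove_border_intersections
-- ===== SOURCE A (Python) =====
-- def remove_border_intersections(intersections, h_fil_segments, v_fil_segments):
--     """
--     Removes intersections that correspond to the border lines.
--
--     Args:
--         intersections: A list of intersection points (tuples of (x, y)).
--         h_fil_segments: A list of horizontal line segments that are not border lines.
--         v_fil_segments: A list of vertical line segments that are not border lines.
--
--     Returns:
--         A new list of intersection points that are within the filtered segments.
--     """
--
--     filtered_intersections = []
--
--     for x, y in intersections:
--         # Check if the intersection point is within a filtered horizontal and vertical segment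
--         is_valid = False
--         for h_seg in h_fil_segments:
--             x1_h, y1_h, x2_h, y2_h = h_seg
--             if min(y1_h, y2_h) <= y <= max(y1_h, y2_h) and min(x1_h,x2_h)<=x<=max(x1_h,x2_h):
--                 for v_seg in v_fil_segments:
--                     x1_v, y1_v, x2_v, y2_v = v_seg
--                     if min(x1_v, x2_v) <= x <= max(x1_v, x2_v) and min(y1_v,y2_v)<=y<=max(y1_v,y2_v):
--                         is_valid = True
--                         break
--             if is_valid:
--                 break
--         if is_valid:
--             filtered_intersections.append((x, y))
--
--     return filtered_intersections
-- ===== SOURCE B (Python) =====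
-- def remove_border_intersections(intersections, h_fil_segments, v_fil_segments):
--     def covered(segments, x, y):
--         return any(min(x1, x2) <= x <= max(x1, x2) and min(y1, y2) <= y <= max(y1, y2)
--                    for (x1, y1, x2, y2) in segments)
--     return [(x, y) for (x, y) in intersections
--             if covered(h_fil_segments, x, y) and covered(v_fil_segments, x, y)]
-- ===== Notes on version B (the rewrite author's own statement) =====
-- stated objective: simpler
-- what changed: Replaced the nested h-loop-with-inner-v-loop break logic by two independent any() bounding-box scans per point: a point is kept iff some h-segment box and some v-segment box both contain it.
import Mathlib
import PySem

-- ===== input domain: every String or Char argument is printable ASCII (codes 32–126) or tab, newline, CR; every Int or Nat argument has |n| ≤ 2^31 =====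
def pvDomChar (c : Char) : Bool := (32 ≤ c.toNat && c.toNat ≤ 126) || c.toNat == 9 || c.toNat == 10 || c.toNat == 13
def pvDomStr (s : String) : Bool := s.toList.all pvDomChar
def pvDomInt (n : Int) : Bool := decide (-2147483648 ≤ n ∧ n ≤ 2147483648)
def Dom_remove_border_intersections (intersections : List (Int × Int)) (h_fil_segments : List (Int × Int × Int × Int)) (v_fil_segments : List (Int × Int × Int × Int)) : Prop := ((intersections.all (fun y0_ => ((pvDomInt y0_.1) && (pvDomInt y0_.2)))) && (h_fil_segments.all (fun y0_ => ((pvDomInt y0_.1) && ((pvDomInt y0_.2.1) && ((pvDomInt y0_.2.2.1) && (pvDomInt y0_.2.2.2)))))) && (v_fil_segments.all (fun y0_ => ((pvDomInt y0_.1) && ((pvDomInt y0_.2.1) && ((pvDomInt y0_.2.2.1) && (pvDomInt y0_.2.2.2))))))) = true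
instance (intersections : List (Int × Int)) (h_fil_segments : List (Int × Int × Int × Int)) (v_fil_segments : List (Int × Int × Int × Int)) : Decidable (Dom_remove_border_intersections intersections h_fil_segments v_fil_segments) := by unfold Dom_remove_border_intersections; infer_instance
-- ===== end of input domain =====

-- B replaces A's nested h-loop-with-inner-v-loop break logic by two independent bounding-box scans per point (simpler decomposition).
-- ===== PORT A =====
-- inner v-loop of A: first v-segment whose box contains (x,y) sets is_valid
def aInnerV (v_segs : List (Int × Int × Int × Int)) (x y : Int) : Bool :=
  match v_segs with
  | [] => false
  | (x1, y1, x2, y2) :: rest =>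
    if decide (min x1 x2 ≤ x) && decide (x ≤ max x1 x2) && decide (min y1 y2 ≤ y) && decide (y ≤ max y1 y2) then
      true
    else aInnerV rest x y

-- outer h-loop of A: on a matching h-segment run the v-loop; break only if it set is_valid
def aOuterH (h_segs v_segs : List (Int × Int × Int × Int)) (x y : Int) : Bool :=
  match h_segs with
  | [] => false
  | (x1, y1, x2, y2) :: rest =>
    if decide (min y1 y2 ≤ y) && decide (y ≤ max y1 y2) && decide (min x1 x2 ≤ x) && decide (x ≤ max x1 x2) then
      if aInnerV v_segs x y then true else aOuterH rest v_segs x y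
    else aOuterH rest v_segs x y

def remove_border_intersections (intersections : List (Int × Int)) (h_fil_segments : List (Int × Int × Int × Int)) (v_fil_segments : List (Int × Int × Int × Int)) : List (Int × Int) :=
  intersections.foldl (fun acc p =>
    if aOuterH h_fil_segments v_fil_segments p.1 p.2 then acc ++ [(p.1, p.2)] else acc) []

-- ===== PORT B =====
-- B's helper: any segment's bounding box contains (x,y)
def bCovered (segs : List (Int × Int × Int × Int)) (x y : Int) : Bool :=
  segs.any (fun s =>
    decide (min s.1 s.2.2.1 ≤ x) && decide (x ≤ max s.1 s.2.2.1) &&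
    decide (min s.2.1 s.2.2.2 ≤ y) && decide (y ≤ max s.2.1 s.2.2.2))

def remove_border_intersections_alt (intersections : List (Int × Int)) (h_fil_segments : List (Int × Int × Int × Int)) (v_fil_segments : List (Int × Int × Int × Int)) : List (Int × Int) :=
  intersections.filter (fun p =>
    bCovered h_fil_segments p.1 p.2 && bCovered v_fil_segments p.1 p.2)

-- ===== PRECONDITION & SPEC =====
def Spec_remove_border_intersections (intersections : List (Int × Int)) (h_fil_segments : List (Int × Int × Int × Int)) (v_fil_segments : List (Int × Int × Int × Int)) (out : List (Int × Int)) : Prop := out = remove_border_intersections_alt intersections h_fil_segments v_fil_segments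
instance (intersections : List (Int × Int)) (h_fil_segments : List (Int × Int × Int × Int)) (v_fil_segments : List (Int × Int × Int × Int)) (out : List (Int × Int)) : Decidable (Spec_remove_border_intersections intersections h_fil_segments v_fil_segments out) := by unfold Spec_remove_border_intersections; infer_instance

-- ===== CLAIM (what is proved, stated in full; the proofs are below) =====
def Claim_equal_remove_border_intersections : Prop := ∀ (intersections : List (Int × Int)) (h_fil_segments : List (Int × Int × Int × Int)) (v_fil_segments : List (Int × Int × Int × Int)), Dom_remove_border_intersections intersections h_fil_segments v_fil_segments → Spec_remove_border_intersections intersections h_fil_segments v_fil_segments (remove_border_intersections intersections h_fil_segments v_fil_segments)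

-- ===== LEMMAS AND PROOFS =====
lemma bool_cond_comm (a b c d : Bool) : (a && b && c && d) = (c && d && a && b) := by
  cases a <;> cases b <;> cases c <;> cases d <;> rfl

lemma innerV_eq (v_segs : List (Int × Int × Int × Int)) (x y : Int) :
    aInnerV v_segs x y = bCovered v_segs x y := by
  induction v_segs with
  | nil => rfl
  | cons s rest ih =>
    obtain ⟨x1, y1, x2, y2⟩ := s
    simp only [bCovered, List.any_cons] at ih ⊢
    rw [aInnerV]
    split_ifs with h
    · rw [h, Bool.true_or]
    · rw [Bool.not_eq_true] at h
      rw [h, Bool.false_or]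
      exact ih

lemma outerH_eq (h_segs v_segs : List (Int × Int × Int × Int)) (x y : Int) :
    aOuterH h_segs v_segs x y = (bCovered h_segs x y && bCovered v_segs x y) := by
  induction h_segs with
  | nil => rw [aOuterH]; simp only [bCovered, List.any_nil, Bool.false_and]
  | cons s rest ih =>
    obtain ⟨x1, y1, x2, y2⟩ := s
    simp only [bCovered, List.any_cons] at ih ⊢
    rw [aOuterH, bool_cond_comm, innerV_eq]
    simp only [bCovered]
    split_ifs with hc hv
    · rw [hc, hv, Bool.true_or, Bool.and_true]
    · rw [Bool.not_eq_true] at hv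
      rw [hv, Bool.and_false] at ih ⊢
      exact ih
    · rw [Bool.not_eq_true] at hc
      rw [hc, Bool.false_or]
      exact ih

-- ===== VERDICT (by name: the statement is the Claim_ definition above) =====
theorem remove_border_intersections_spec : Claim_equal_remove_border_intersections := by
  intro ints h v _
  unfold Spec_remove_border_intersections remove_border_intersections remove_border_intersections_alt
  rw [PySem.List.foldl_append_if]
  simp only [List.nil_append, outerH_eq]
  simp [Prod.mk.eta]
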